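-- pv_equiv track=rewrite | github.com/rakeshsingh157/backend-python | ai_scheduler.py | _get_smart_reminder
-- ===== SOURCE A (Python) =====
-- def _get_smart_reminder(title, description, category):
--     """
--     Intelligently determine appropriate reminder setting based on task details
--     """
--     title_lower = title.lower()
--     description_lower = description.lower()
--     category_lower = category.lower()
--
--     # Critical/Important events - longer reminders
--     critical_keywords = ['flight', 'interview', 'exam', 'surgery', 'wedding', 'deadline', 'presentation']
--     if any(keyword in title_lower or keyword in description_lower for keyword in critical_keywords):
--         return "1 day"
--
--     # Medical/Health appointments
--     if category_lower == 'health' or any(word in title_lower for word in ['doctor', 'dentist', 'hospital', 'clinic', 'appointment']):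
--         return "2 hours"
--
--     # Work-related tasks
--     if category_lower == 'work' or any(word in title_lower for word in ['meeting', 'conference', 'call', 'standup']):
--         if 'important' in description_lower or 'urgent' in description_lower:
--             return "2 hours"
--         return "1 hour"
--
--     # Travel related
--     if category_lower == 'travel' or any(word in title_lower for word in ['flight', 'train', 'bus', 'trip', 'travel']):
--         return "4 hours"
--
--     # Fitness/Gym
--     if category_lower == 'fitness' or any(word in title_lower for word in ['gym', 'workout', 'exercise', 'run', 'yoga']):
--         return "30 minutes"
--
--     # Education/Learning
--     if category_lower == 'education' or any(word in title_lower for word in ['class', 'course', 'study', 'learn', 'training']):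
--         return "30 minutes"
--
--     # Social events
--     if category_lower == 'social' or any(word in title_lower for word in ['party', 'dinner', 'lunch', 'hangout', 'date']):
--         return "1 hour"
--
--     # Shopping/Errands
--     if category_lower == 'shopping' or any(word in title_lower for word in ['shop', 'buy', 'grocery', 'market']):
--         return "1 hour"
--
--     # Maintenance/Repairs
--     if category_lower == 'maintenance' or any(word in title_lower for word in ['repair', 'fix', 'service', 'maintenance']):
--         return "2 hours"
--
--     # Finance related
--     if category_lower == 'finance' or any(word in title_lower for word in ['bank', 'payment', 'tax', 'budget']):
--         return "1 hour"
--
--     # Default for personal and everything else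
--     return "15 minutes"
-- ===== SOURCE B (Python) =====
-- # Min-rank re-implementation: instead of a first-match cascade, collect the ranks of ALL
-- # matching rules and return the result of the lowest (best) rank; first-match == min-rank
-- # because the rules' conditions are independent of each other.
--
-- _TITLE_KW = {
--     'flight': 0, 'interview': 0, 'exam': 0, 'surgery': 0, 'wedding': 0, 'deadline': 0, 'presentation': 0,
--     'doctor': 1, 'dentist': 1, 'hospital': 1, 'clinic': 1, 'appointment': 1,
--     'meeting': 2, 'conference': 2, 'call': 2, 'standup': 2,
--     'train': 3, 'bus': 3, 'trip': 3, 'travel': 3,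
--     'gym': 4, 'workout': 4, 'exercise': 4, 'run': 4, 'yoga': 4,
--     'class': 5, 'course': 5, 'study': 5, 'learn': 5, 'training': 5,
--     'party': 6, 'dinner': 6, 'lunch': 6, 'hangout': 6, 'date': 6,
--     'shop': 7, 'buy': 7, 'grocery': 7, 'market': 7,
--     'repair': 8, 'fix': 8, 'service': 8, 'maintenance': 8,
--     'bank': 9, 'payment': 9, 'tax': 9, 'budget': 9,
-- }
-- # 'flight' keeps rank 0 only: a title containing it already wins rule 0, so travel's copy never decides.
--
-- _CAT_RANK = {'health': 1, 'work': 2, 'travel': 3, 'fitness': 4, 'education': 5,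
--              'social': 6, 'shopping': 7, 'maintenance': 8, 'finance': 9}
--
-- _CRITICAL = ('flight', 'interview', 'exam', 'surgery', 'wedding', 'deadline', 'presentation')
--
-- _RESULTS = ("1 day", "2 hours", "1 hour", "4 hours", "30 minutes", "30 minutes",
--             "1 hour", "1 hour", "2 hours", "1 hour", "15 minutes")
--
--
-- def _best_rank(tl, dl, cl):
--     best = 10
--     for kw, rank in _TITLE_KW.items():
--         if kw in tl:
--             best = min(best, rank)
--     if best > 0 and any(kw in dl for kw in _CRITICAL):
--         best = 0
--     return min(best, _CAT_RANK.get(cl, 10))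
--
--
-- def _get_smart_reminder(title, description, category):
--     dl = description.lower()
--     best = _best_rank(title.lower(), dl, category.lower())
--     if best == 2 and ('important' in dl or 'urgent' in dl):
--         return "2 hours"
--     return _RESULTS[best]
-- ===== Notes on version B (the rewrite author's own statement) =====
-- stated objective: alternative
-- what changed: Replaced the first-match if-cascade by a min-rank computation: every keyword carries a numeric rank in one flat dict, a single loop takes the minimum rank over all matches (plus the category's rank and the critical-description check), and the answer is a table lookup at that rank; first-match equals min-rank because the rules' conditions are independent.
import Mathlib
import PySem

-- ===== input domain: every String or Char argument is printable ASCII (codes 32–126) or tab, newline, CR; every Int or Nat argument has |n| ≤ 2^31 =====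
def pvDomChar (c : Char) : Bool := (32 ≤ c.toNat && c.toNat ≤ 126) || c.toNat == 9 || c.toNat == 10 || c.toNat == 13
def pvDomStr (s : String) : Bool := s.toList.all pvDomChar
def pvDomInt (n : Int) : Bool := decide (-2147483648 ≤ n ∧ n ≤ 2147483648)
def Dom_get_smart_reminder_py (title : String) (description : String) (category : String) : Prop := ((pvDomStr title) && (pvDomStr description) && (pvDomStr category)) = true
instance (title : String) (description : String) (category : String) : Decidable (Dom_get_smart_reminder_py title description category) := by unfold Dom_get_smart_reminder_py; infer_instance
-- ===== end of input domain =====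

-- B replaces A's first-match if-cascade by a min-rank computation: one flat keyword→rank
-- table, a single loop taking the minimum rank over all matches, and a result table lookup.

-- ===== PORT A =====
def get_smart_reminder_py (title : String) (description : String) (category : String) : String :=
  let title_lower := PySem.Str.lower title
  let description_lower := PySem.Str.lower description
  let category_lower := PySem.Str.lower category
  if (["flight", "interview", "exam", "surgery", "wedding", "deadline", "presentation"].any
      (fun k => PySem.Str.isIn k title_lower || PySem.Str.isIn k description_lower)) then "1 day"
  else if (category_lower == "health" || ["doctor", "dentist", "hospital", "clinic", "appointment"].any
      (fun w => PySem.Str.isIn w title_lower)) then "2 hours"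
  else if (category_lower == "work" || ["meeting", "conference", "call", "standup"].any
      (fun w => PySem.Str.isIn w title_lower)) then
    (if PySem.Str.isIn "important" description_lower || PySem.Str.isIn "urgent" description_lower
     then "2 hours" else "1 hour")
  else if (category_lower == "travel" || ["flight", "train", "bus", "trip", "travel"].any
      (fun w => PySem.Str.isIn w title_lower)) then "4 hours"
  else if (category_lower == "fitness" || ["gym", "workout", "exercise", "run", "yoga"].any
      (fun w => PySem.Str.isIn w title_lower)) then "30 minutes"
  else if (category_lower == "education" || ["class", "course", "study", "learn", "training"].any
      (fun w => PySem.Str.isIn w title_lower)) then "30 minutes"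
  else if (category_lower == "social" || ["party", "dinner", "lunch", "hangout", "date"].any
      (fun w => PySem.Str.isIn w title_lower)) then "1 hour"
  else if (category_lower == "shopping" || ["shop", "buy", "grocery", "market"].any
      (fun w => PySem.Str.isIn w title_lower)) then "1 hour"
  else if (category_lower == "maintenance" || ["repair", "fix", "service", "maintenance"].any
      (fun w => PySem.Str.isIn w title_lower)) then "2 hours"
  else if (category_lower == "finance" || ["bank", "payment", "tax", "budget"].any
      (fun w => PySem.Str.isIn w title_lower)) then "1 hour"
  else "15 minutes"

-- ===== PORT B ===== (transliteration of Source B: flat keyword→rank table, min over all matches)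
def pvTitleKW : List (String × Nat) :=
  [("flight", 0), ("interview", 0), ("exam", 0), ("surgery", 0), ("wedding", 0), ("deadline", 0), ("presentation", 0),
   ("doctor", 1), ("dentist", 1), ("hospital", 1), ("clinic", 1), ("appointment", 1),
   ("meeting", 2), ("conference", 2), ("call", 2), ("standup", 2),
   ("train", 3), ("bus", 3), ("trip", 3), ("travel", 3),
   ("gym", 4), ("workout", 4), ("exercise", 4), ("run", 4), ("yoga", 4),
   ("class", 5), ("course", 5), ("study", 5), ("learn", 5), ("training", 5),
   ("party", 6), ("dinner", 6), ("lunch", 6), ("hangout", 6), ("date", 6),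
   ("shop", 7), ("buy", 7), ("grocery", 7), ("market", 7),
   ("repair", 8), ("fix", 8), ("service", 8), ("maintenance", 8),
   ("bank", 9), ("payment", 9), ("tax", 9), ("budget", 9)]

def pvCatRank : PySem.Dict String Nat :=
  PySem.Dict.ofList [("health", 1), ("work", 2), ("travel", 3), ("fitness", 4), ("education", 5),
                     ("social", 6), ("shopping", 7), ("maintenance", 8), ("finance", 9)]

def pvCritical : List String := ["flight", "interview", "exam", "surgery", "wedding", "deadline", "presentation"]

def pvResults : List String := ["1 day", "2 hours", "1 hour", "4 hours", "30 minutes", "30 minutes",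
                                "1 hour", "1 hour", "2 hours", "1 hour", "15 minutes"]

-- the loop body of Source B's for-loop over _TITLE_KW.items()
def pvStep (tl : String) (b : Nat) (p : String × Nat) : Nat :=
  if PySem.Str.isIn p.1 tl then min b p.2 else b

def pvBestRank (tl : String) (dl : String) (cl : String) : Nat :=
  let b1 := pvTitleKW.foldl (pvStep tl) 10
  let b2 := if 0 < b1 ∧ (pvCritical.any fun kw => PySem.Str.isIn kw dl) = true then 0 else b1
  min b2 (PySem.Dict.getD pvCatRank cl 10)

def get_smart_reminder_py_alt (title : String) (description : String) (category : String) : String :=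
  let dl := PySem.Str.lower description
  let best := pvBestRank (PySem.Str.lower title) dl (PySem.Str.lower category)
  if best == 2 && (PySem.Str.isIn "important" dl || PySem.Str.isIn "urgent" dl) then "2 hours"
  else pvResults.getD best "15 minutes"   -- best ≤ 10 always, so Python's _RESULTS[best] never raises and the default is dead

-- ===== PRECONDITION & SPEC =====
def Spec_get_smart_reminder_py (title : String) (description : String) (category : String) (out : String) : Prop := out = get_smart_reminder_py_alt title description category
instance (title : String) (description : String) (category : String) (out : String) : Decidable (Spec_get_smart_reminder_py title description category out) := by unfold Spec_get_smart_reminder_py; infer_instance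

-- ===== CLAIM (what is proved, stated in full; the proofs are below) =====
def Claim_equal_get_smart_reminder_py : Prop := ∀ (title : String) (description : String) (category : String), Dom_get_smart_reminder_py title description category → Spec_get_smart_reminder_py title description category (get_smart_reminder_py title description category)

-- ===== LEMMAS AND PROOFS =====

-- proof-side helper: A's cascade as a rank (position of the first matching rule)
def pvARank (tl : String) (dl : String) (cl : String) : Nat :=
  if (["flight", "interview", "exam", "surgery", "wedding", "deadline", "presentation"].any fun k => PySem.Str.isIn k tl) || (["flight", "interview", "exam", "surgery", "wedding", "deadline", "presentation"].any fun k => PySem.Str.isIn k dl) then 0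
  else if cl == "health" || (["doctor", "dentist", "hospital", "clinic", "appointment"].any fun k => PySem.Str.isIn k tl) then 1
  else if cl == "work" || (["meeting", "conference", "call", "standup"].any fun k => PySem.Str.isIn k tl) then 2
  else if cl == "travel" || (["flight", "train", "bus", "trip", "travel"].any fun k => PySem.Str.isIn k tl) then 3
  else if cl == "fitness" || (["gym", "workout", "exercise", "run", "yoga"].any fun k => PySem.Str.isIn k tl) then 4
  else if cl == "education" || (["class", "course", "study", "learn", "training"].any fun k => PySem.Str.isIn k tl) then 5
  else if cl == "social" || (["party", "dinner", "lunch", "hangout", "date"].any fun k => PySem.Str.isIn k tl) then 6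
  else if cl == "shopping" || (["shop", "buy", "grocery", "market"].any fun k => PySem.Str.isIn k tl) then 7
  else if cl == "maintenance" || (["repair", "fix", "service", "maintenance"].any fun k => PySem.Str.isIn k tl) then 8
  else if cl == "finance" || (["bank", "payment", "tax", "budget"].any fun k => PySem.Str.isIn k tl) then 9
  else 10

-- proof-side helper: the first-group-match chain of B's keyword table
def pvChainT (tl : String) : Nat :=
  if (["flight", "interview", "exam", "surgery", "wedding", "deadline", "presentation"].any fun k => PySem.Str.isIn k tl) then 0
  else if (["doctor", "dentist", "hospital", "clinic", "appointment"].any fun k => PySem.Str.isIn k tl) then 1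
  else if (["meeting", "conference", "call", "standup"].any fun k => PySem.Str.isIn k tl) then 2
  else if (["train", "bus", "trip", "travel"].any fun k => PySem.Str.isIn k tl) then 3
  else if (["gym", "workout", "exercise", "run", "yoga"].any fun k => PySem.Str.isIn k tl) then 4
  else if (["class", "course", "study", "learn", "training"].any fun k => PySem.Str.isIn k tl) then 5
  else if (["party", "dinner", "lunch", "hangout", "date"].any fun k => PySem.Str.isIn k tl) then 6
  else if (["shop", "buy", "grocery", "market"].any fun k => PySem.Str.isIn k tl) then 7
  else if (["repair", "fix", "service", "maintenance"].any fun k => PySem.Str.isIn k tl) then 8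
  else if (["bank", "payment", "tax", "budget"].any fun k => PySem.Str.isIn k tl) then 9
  else 10

-- proof-side helper: Source B's _CAT_RANK.get(cl, 10) as an equality chain
def pvCatChain (cl : String) : Nat :=
  if cl = "health" then 1
  else if cl = "work" then 2
  else if cl = "travel" then 3
  else if cl = "fitness" then 4
  else if cl = "education" then 5
  else if cl = "social" then 6
  else if cl = "shopping" then 7
  else if cl = "maintenance" then 8
  else if cl = "finance" then 9
  else 10

-- the table as its ten same-rank groups
def pvGroups : List (List String × Nat) :=
  [(["flight", "interview", "exam", "surgery", "wedding", "deadline", "presentation"], 0), (["doctor", "dentist", "hospital", "clinic", "appointment"], 1), (["meeting", "conference", "call", "standup"], 2), (["train", "bus", "trip", "travel"], 3), (["gym", "workout", "exercise", "run", "yoga"], 4),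
   (["class", "course", "study", "learn", "training"], 5), (["party", "dinner", "lunch", "hangout", "date"], 6), (["shop", "buy", "grocery", "market"], 7), (["repair", "fix", "service", "maintenance"], 8), (["bank", "payment", "tax", "budget"], 9)]

def pvFlat (gs : List (List String × Nat)) : List (String × Nat) :=
  (gs.map (fun p => p.1.map (fun k => (k, p.2)))).flatten

-- minimum matched rank over the groups (10 = no match), Source B's loop group by group
def pvMinRank (tl : String) : List (List String × Nat) → Nat
  | [] => 10
  | p :: rest => if p.1.any (fun k => PySem.Str.isIn k tl) then min p.2 (pvMinRank tl rest) else pvMinRank tl rest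

-- A's rule-0 condition splits into a title-part and a description-part
lemma pvAnyOr (p q : String → Bool) (l : List String) :
    (l.any fun k => p k || q k) = (l.any p || l.any q) := by
  induction l with
  | nil => simp
  | cons x xs ih => simp only [List.any, ih]; simp [Bool.or_assoc, Bool.or_left_comm]

-- folding Source B's loop body over one same-rank group of the table
lemma pvFoldGroup (tl : String) (kws : List String) (r b : Nat) :
    List.foldl (pvStep tl) b (kws.map (fun k => (k, r))) =
      if kws.any (fun k => PySem.Str.isIn k tl) then min b r else b := by
  induction kws generalizing b with
  | nil => simp
  | cons x xs ih =>
    by_cases h : PySem.Str.isIn x tl <;>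
      simp only [List.map, List.foldl, List.any, pvStep, h, ih, Bool.true_or, Bool.false_or,
        if_true] <;> split <;> simp [Nat.min_assoc]

-- the fold over the flattened groups computes min of the start value and the minimum matched rank
lemma pvFoldFlat (tl : String) (gs : List (List String × Nat)) (b : Nat) (hb : b ≤ 10) :
    (pvFlat gs).foldl (pvStep tl) b = min b (pvMinRank tl gs) := by
  induction gs generalizing b with
  | nil => simp [pvFlat, pvMinRank, Nat.min_eq_left hb]
  | cons p rest ih =>
    have hsplit : pvFlat (p :: rest) = p.1.map (fun k => (k, p.2)) ++ pvFlat rest := by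
      simp [pvFlat]
    rw [hsplit, List.foldl_append, pvFoldGroup]
    by_cases h : (p.1.any fun k => PySem.Str.isIn k tl) = true
    · simp only [h, if_true, pvMinRank]
      rw [ih _ (by omega)]
      omega
    · simp only [Bool.not_eq_true] at h
      simp only [h, pvMinRank, if_false]
      exact ih b hb

-- chain form of pvMinRank: rank of the FIRST matching group
def pvChainG (tl : String) : List (List String × Nat) → Nat
  | [] => 10
  | p :: rest => if p.1.any (fun k => PySem.Str.isIn k tl) then p.2 else pvChainG tl rest

-- lower bound for pvChainG
lemma le_pvChainG (tl : String) (gs : List (List String × Nat)) (m : Nat) (h10 : m ≤ 10)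
    (h : ∀ p ∈ gs, m ≤ p.2) : m ≤ pvChainG tl gs := by
  induction gs with
  | nil => simpa [pvChainG]
  | cons p rest ih =>
    simp only [pvChainG]
    have h2 : ∀ q ∈ rest, m ≤ q.2 := fun q hq => h q (List.mem_cons_of_mem _ hq)
    split
    · exact h p List.mem_cons_self
    · exact ih h2

-- upper bound for pvChainG
lemma pvChainG_le (tl : String) (gs : List (List String × Nat))
    (h10 : ∀ p ∈ gs, p.2 ≤ 10) : pvChainG tl gs ≤ 10 := by
  induction gs with
  | nil => simp [pvChainG]
  | cons p rest ih =>
    simp only [pvChainG]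
    have h2 : ∀ q ∈ rest, q.2 ≤ 10 := fun q hq => h10 q (List.mem_cons_of_mem _ hq)
    split
    · exact h10 p List.mem_cons_self
    · exact ih h2

-- on rank-sorted groups the minimum matched rank is the first matched rank
lemma pvMinRank_eq_chainG (tl : String) (gs : List (List String × Nat))
    (hsort : (gs.map Prod.snd).Pairwise (· ≤ ·)) (h10 : ∀ p ∈ gs, p.2 ≤ 10) :
    pvMinRank tl gs = pvChainG tl gs := by
  induction gs with
  | nil => rfl
  | cons p rest ih =>
    simp only [List.map_cons, List.pairwise_cons] at hsort
    have hrest : ∀ q ∈ rest, q.2 ≤ 10 := fun q hq => h10 q (List.mem_cons_of_mem _ hq)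
    have hp : ∀ q ∈ rest, p.2 ≤ q.2 := by
      intro q hq; exact hsort.1 q.2 (List.mem_map_of_mem hq)
    simp only [pvMinRank, pvChainG, ih hsort.2 hrest]
    split
    · exact Nat.min_eq_left (le_pvChainG tl rest p.2 (h10 p List.mem_cons_self) hp)
    · rfl

-- the fold over the whole table is the first-group-match chain
lemma pvFold_eq (tl : String) : pvTitleKW.foldl (pvStep tl) 10 = pvChainT tl := by
  have h : pvTitleKW = pvFlat pvGroups := rfl
  rw [h, pvFoldFlat tl pvGroups 10 le_rfl,
     pvMinRank_eq_chainG tl pvGroups (by decide) (by decide)]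
  have hle : pvChainG tl pvGroups ≤ 10 := pvChainG_le tl pvGroups (by decide)
  rw [Nat.min_eq_right hle]
  rfl

-- Source B's _CAT_RANK.get(cl, 10) is the equality chain
lemma pvCat_eq (cl : String) : PySem.Dict.getD pvCatRank cl 10 = pvCatChain cl := by
  simp only [pvCatRank, PySem.Dict.ofList, PySem.Dict.update, List.foldl,
    PySem.Dict.getD_insert, PySem.Dict.getD_empty, pvCatChain]
  split_ifs <;> first | rfl | simp_all

lemma pvBoolTF (b : Bool) : b = true ∨ b = false := by cases b <;> simp

-- arithmetic core of the description-only critical match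
lemma pvAux (C K : Nat) (h : 1 ≤ C) : (0 : Nat) = min (if 0 < C then 0 else C) K := by
  simp [Nat.lt_of_lt_of_le Nat.zero_lt_one h]

-- peel the shared keyword "flight" off the critical list / A's travel list
lemma pvCritSplit (p : String → Bool) :
    (["flight", "interview", "exam", "surgery", "wedding", "deadline", "presentation"].any p) = (p "flight" || ["interview", "exam", "surgery", "wedding", "deadline", "presentation"].any p) := rfl

lemma pvTravelSplit (p : String → Bool) :
    (["flight", "train", "bus", "trip", "travel"].any p) = (p "flight" || ["train", "bus", "trip", "travel"].any p) := rfl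

-- A's cascade in rank form
set_option maxHeartbeats 2000000 in
lemma pvA_rank (tl dl cl : String) :
    (if (["flight", "interview", "exam", "surgery", "wedding", "deadline", "presentation"].any fun k => PySem.Str.isIn k tl || PySem.Str.isIn k dl) then "1 day"
     else if (cl == "health" || ["doctor", "dentist", "hospital", "clinic", "appointment"].any fun w => PySem.Str.isIn w tl) then "2 hours"
     else if (cl == "work" || ["meeting", "conference", "call", "standup"].any fun w => PySem.Str.isIn w tl) then (if (PySem.Str.isIn "important" dl || PySem.Str.isIn "urgent" dl) then "2 hours" else "1 hour")
     else if (cl == "travel" || ["flight", "train", "bus", "trip", "travel"].any fun w => PySem.Str.isIn w tl) then "4 hours"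
     else if (cl == "fitness" || ["gym", "workout", "exercise", "run", "yoga"].any fun w => PySem.Str.isIn w tl) then "30 minutes"
     else if (cl == "education" || ["class", "course", "study", "learn", "training"].any fun w => PySem.Str.isIn w tl) then "30 minutes"
     else if (cl == "social" || ["party", "dinner", "lunch", "hangout", "date"].any fun w => PySem.Str.isIn w tl) then "1 hour"
     else if (cl == "shopping" || ["shop", "buy", "grocery", "market"].any fun w => PySem.Str.isIn w tl) then "1 hour"
     else if (cl == "maintenance" || ["repair", "fix", "service", "maintenance"].any fun w => PySem.Str.isIn w tl) then "2 hours"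
     else if (cl == "finance" || ["bank", "payment", "tax", "budget"].any fun w => PySem.Str.isIn w tl) then "1 hour"
     else "15 minutes")
    = (if pvARank tl dl cl == 2 && (PySem.Str.isIn "important" dl || PySem.Str.isIn "urgent" dl) then "2 hours"
       else pvResults.getD (pvARank tl dl cl) "15 minutes") := by
  simp only [pvAnyOr, pvARank]
  cases hc0 : ((["flight", "interview", "exam", "surgery", "wedding", "deadline", "presentation"].any fun k => PySem.Str.isIn k tl) || (["flight", "interview", "exam", "surgery", "wedding", "deadline", "presentation"].any fun k => PySem.Str.isIn k dl)) <;> simp only [hc0, Bool.false_eq_true, reduceIte] <;> (try rfl) <;>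
  cases hc1 : (cl == "health" || (["doctor", "dentist", "hospital", "clinic", "appointment"].any fun k => PySem.Str.isIn k tl)) <;> simp only [hc1, Bool.false_eq_true, reduceIte] <;> (try rfl) <;>
  cases hc2 : (cl == "work" || (["meeting", "conference", "call", "standup"].any fun k => PySem.Str.isIn k tl)) <;> simp only [hc2, Bool.false_eq_true, reduceIte] <;> (try rfl) <;>
  cases hc3 : (cl == "travel" || (["flight", "train", "bus", "trip", "travel"].any fun k => PySem.Str.isIn k tl)) <;> simp only [hc3, Bool.false_eq_true, reduceIte] <;> (try rfl) <;>
  cases hc4 : (cl == "fitness" || (["gym", "workout", "exercise", "run", "yoga"].any fun k => PySem.Str.isIn k tl)) <;> simp only [hc4, Bool.false_eq_true, reduceIte] <;> (try rfl) <;>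
  cases hc5 : (cl == "education" || (["class", "course", "study", "learn", "training"].any fun k => PySem.Str.isIn k tl)) <;> simp only [hc5, Bool.false_eq_true, reduceIte] <;> (try rfl) <;>
  cases hc6 : (cl == "social" || (["party", "dinner", "lunch", "hangout", "date"].any fun k => PySem.Str.isIn k tl)) <;> simp only [hc6, Bool.false_eq_true, reduceIte] <;> (try rfl) <;>
  cases hc7 : (cl == "shopping" || (["shop", "buy", "grocery", "market"].any fun k => PySem.Str.isIn k tl)) <;> simp only [hc7, Bool.false_eq_true, reduceIte] <;> (try rfl) <;>
  cases hc8 : (cl == "maintenance" || (["repair", "fix", "service", "maintenance"].any fun k => PySem.Str.isIn k tl)) <;> simp only [hc8, Bool.false_eq_true, reduceIte] <;> (try rfl) <;>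
  cases hc9 : (cl == "finance" || (["bank", "payment", "tax", "budget"].any fun k => PySem.Str.isIn k tl)) <;> simp only [hc9, Bool.false_eq_true, reduceIte] <;> (try rfl) <;>
  cases hW : (PySem.Str.isIn "important" dl || PySem.Str.isIn "urgent" dl) <;> simp only [hW, Bool.and_true, Bool.and_false, reduceIte] <;> rfl

-- A's first-match rank equals B's min-rank
set_option maxHeartbeats 2000000 in
lemma pvKey (tl dl cl : String) :
    pvARank tl dl cl =
      min (if 0 < pvChainT tl ∧ (["flight", "interview", "exam", "surgery", "wedding", "deadline", "presentation"].any fun kw => PySem.Str.isIn kw dl) = true then 0 else pvChainT tl)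
        (pvCatChain cl) := by
  unfold pvARank pvChainT pvCatChain
  simp only [pvCritSplit, pvTravelSplit]
  rcases pvBoolTF (PySem.Str.isIn "flight" tl) with hFl | hFl
  · simp only [Bool.or_eq_true, beq_iff_eq, Bool.or_true, Bool.or_false, Bool.true_or, Bool.false_or, Bool.false_eq_true, Bool.true_eq_false, eq_self_iff_true, and_true, true_and, and_false, false_and, reduceIte, String.reduceEq, Nat.zero_min, Nat.min_zero, Nat.min_self, lt_irrefl, hFl]; all_goals ((try split_ifs) <;> omega)
  rcases pvBoolTF ((["interview", "exam", "surgery", "wedding", "deadline", "presentation"].any fun k => PySem.Str.isIn k tl)) with hT0 | hT0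
  · simp only [Bool.or_eq_true, beq_iff_eq, Bool.or_true, Bool.or_false, Bool.true_or, Bool.false_or, Bool.false_eq_true, Bool.true_eq_false, eq_self_iff_true, and_true, true_and, and_false, false_and, reduceIte, String.reduceEq, Nat.zero_min, Nat.min_zero, Nat.min_self, lt_irrefl, hFl, hT0]; all_goals ((try split_ifs) <;> omega)
  rcases pvBoolTF ((PySem.Str.isIn "flight" dl || ["interview", "exam", "surgery", "wedding", "deadline", "presentation"].any fun k => PySem.Str.isIn k dl)) with hD0 | hD0
  · simp only [Bool.or_eq_true, beq_iff_eq, Bool.or_true, Bool.or_false, Bool.true_or, Bool.false_or, Bool.false_eq_true, Bool.true_eq_false, eq_self_iff_true, and_true, true_and, and_false, false_and, reduceIte, String.reduceEq, Nat.zero_min, Nat.min_zero, Nat.min_self, lt_irrefl, hFl, hT0, hD0]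
    refine pvAux _ _ ?_
    split_ifs <;> omega
  rcases pvBoolTF ((["doctor", "dentist", "hospital", "clinic", "appointment"].any fun k => PySem.Str.isIn k tl)) with hT1 | hT1
  · simp only [Bool.or_eq_true, beq_iff_eq, Bool.or_true, Bool.or_false, Bool.true_or, Bool.false_or, Bool.false_eq_true, Bool.true_eq_false, eq_self_iff_true, and_true, true_and, and_false, false_and, reduceIte, String.reduceEq, Nat.zero_min, Nat.min_zero, Nat.min_self, lt_irrefl, hFl, hT0, hD0, hT1]; all_goals ((try split_ifs) <;> omega)
  by_cases hE1 : cl = "health"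
  · simp only [Bool.or_eq_true, beq_iff_eq, Bool.or_true, Bool.or_false, Bool.true_or, Bool.false_or, Bool.false_eq_true, Bool.true_eq_false, eq_self_iff_true, and_true, true_and, and_false, false_and, reduceIte, String.reduceEq, Nat.zero_min, Nat.min_zero, Nat.min_self, lt_irrefl, hFl, hT0, hD0, hT1, hE1]; all_goals ((try split_ifs) <;> omega)
  rcases pvBoolTF ((["meeting", "conference", "call", "standup"].any fun k => PySem.Str.isIn k tl)) with hT2 | hT2
  · simp only [Bool.or_eq_true, beq_iff_eq, Bool.or_true, Bool.or_false, Bool.true_or, Bool.false_or, Bool.false_eq_true, Bool.true_eq_false, eq_self_iff_true, and_true, true_and, and_false, false_and, reduceIte, String.reduceEq, Nat.zero_min, Nat.min_zero, Nat.min_self, lt_irrefl, hFl, hT0, hD0, hT1, hE1, hT2]; all_goals ((try split_ifs) <;> omega)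
  by_cases hE2 : cl = "work"
  · simp only [Bool.or_eq_true, beq_iff_eq, Bool.or_true, Bool.or_false, Bool.true_or, Bool.false_or, Bool.false_eq_true, Bool.true_eq_false, eq_self_iff_true, and_true, true_and, and_false, false_and, reduceIte, String.reduceEq, Nat.zero_min, Nat.min_zero, Nat.min_self, lt_irrefl, hFl, hT0, hD0, hT1, hE1, hT2, hE2]; all_goals ((try split_ifs) <;> omega)
  rcases pvBoolTF ((["train", "bus", "trip", "travel"].any fun k => PySem.Str.isIn k tl)) with hT3 | hT3
  · simp only [Bool.or_eq_true, beq_iff_eq, Bool.or_true, Bool.or_false, Bool.true_or, Bool.false_or, Bool.false_eq_true, Bool.true_eq_false, eq_self_iff_true, and_true, true_and, and_false, false_and, reduceIte, String.reduceEq, Nat.zero_min, Nat.min_zero, Nat.min_self, lt_irrefl, hFl, hT0, hD0, hT1, hE1, hT2, hE2, hT3]; all_goals ((try split_ifs) <;> omega)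
  by_cases hE3 : cl = "travel"
  · simp only [Bool.or_eq_true, beq_iff_eq, Bool.or_true, Bool.or_false, Bool.true_or, Bool.false_or, Bool.false_eq_true, Bool.true_eq_false, eq_self_iff_true, and_true, true_and, and_false, false_and, reduceIte, String.reduceEq, Nat.zero_min, Nat.min_zero, Nat.min_self, lt_irrefl, hFl, hT0, hD0, hT1, hE1, hT2, hE2, hT3, hE3]; all_goals ((try split_ifs) <;> omega)
  rcases pvBoolTF ((["gym", "workout", "exercise", "run", "yoga"].any fun k => PySem.Str.isIn k tl)) with hT4 | hT4
  · simp only [Bool.or_eq_true, beq_iff_eq, Bool.or_true, Bool.or_false, Bool.true_or, Bool.false_or, Bool.false_eq_true, Bool.true_eq_false, eq_self_iff_true, and_true, true_and, and_false, false_and, reduceIte, String.reduceEq, Nat.zero_min, Nat.min_zero, Nat.min_self, lt_irrefl, hFl, hT0, hD0, hT1, hE1, hT2, hE2, hT3, hE3, hT4]; all_goals ((try split_ifs) <;> omega)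
  by_cases hE4 : cl = "fitness"
  · simp only [Bool.or_eq_true, beq_iff_eq, Bool.or_true, Bool.or_false, Bool.true_or, Bool.false_or, Bool.false_eq_true, Bool.true_eq_false, eq_self_iff_true, and_true, true_and, and_false, false_and, reduceIte, String.reduceEq, Nat.zero_min, Nat.min_zero, Nat.min_self, lt_irrefl, hFl, hT0, hD0, hT1, hE1, hT2, hE2, hT3, hE3, hT4, hE4]; all_goals ((try split_ifs) <;> omega)
  rcases pvBoolTF ((["class", "course", "study", "learn", "training"].any fun k => PySem.Str.isIn k tl)) with hT5 | hT5
  · simp only [Bool.or_eq_true, beq_iff_eq, Bool.or_true, Bool.or_false, Bool.true_or, Bool.false_or, Bool.false_eq_true, Bool.true_eq_false, eq_self_iff_true, and_true, true_and, and_false, false_and, reduceIte, String.reduceEq, Nat.zero_min, Nat.min_zero, Nat.min_self, lt_irrefl, hFl, hT0, hD0, hT1, hE1, hT2, hE2, hT3, hE3, hT4, hE4, hT5]; all_goals ((try split_ifs) <;> omega)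
  by_cases hE5 : cl = "education"
  · simp only [Bool.or_eq_true, beq_iff_eq, Bool.or_true, Bool.or_false, Bool.true_or, Bool.false_or, Bool.false_eq_true, Bool.true_eq_false, eq_self_iff_true, and_true, true_and, and_false, false_and, reduceIte, String.reduceEq, Nat.zero_min, Nat.min_zero, Nat.min_self, lt_irrefl, hFl, hT0, hD0, hT1, hE1, hT2, hE2, hT3, hE3, hT4, hE4, hT5, hE5]; all_goals ((try split_ifs) <;> omega)
  rcases pvBoolTF ((["party", "dinner", "lunch", "hangout", "date"].any fun k => PySem.Str.isIn k tl)) with hT6 | hT6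
  · simp only [Bool.or_eq_true, beq_iff_eq, Bool.or_true, Bool.or_false, Bool.true_or, Bool.false_or, Bool.false_eq_true, Bool.true_eq_false, eq_self_iff_true, and_true, true_and, and_false, false_and, reduceIte, String.reduceEq, Nat.zero_min, Nat.min_zero, Nat.min_self, lt_irrefl, hFl, hT0, hD0, hT1, hE1, hT2, hE2, hT3, hE3, hT4, hE4, hT5, hE5, hT6]; all_goals ((try split_ifs) <;> omega)
  by_cases hE6 : cl = "social"
  · simp only [Bool.or_eq_true, beq_iff_eq, Bool.or_true, Bool.or_false, Bool.true_or, Bool.false_or, Bool.false_eq_true, Bool.true_eq_false, eq_self_iff_true, and_true, true_and, and_false, false_and, reduceIte, String.reduceEq, Nat.zero_min, Nat.min_zero, Nat.min_self, lt_irrefl, hFl, hT0, hD0, hT1, hE1, hT2, hE2, hT3, hE3, hT4, hE4, hT5, hE5, hT6, hE6]; all_goals ((try split_ifs) <;> omega)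
  rcases pvBoolTF ((["shop", "buy", "grocery", "market"].any fun k => PySem.Str.isIn k tl)) with hT7 | hT7
  · simp only [Bool.or_eq_true, beq_iff_eq, Bool.or_true, Bool.or_false, Bool.true_or, Bool.false_or, Bool.false_eq_true, Bool.true_eq_false, eq_self_iff_true, and_true, true_and, and_false, false_and, reduceIte, String.reduceEq, Nat.zero_min, Nat.min_zero, Nat.min_self, lt_irrefl, hFl, hT0, hD0, hT1, hE1, hT2, hE2, hT3, hE3, hT4, hE4, hT5, hE5, hT6, hE6, hT7]; all_goals ((try split_ifs) <;> omega)
  by_cases hE7 : cl = "shopping"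
  · simp only [Bool.or_eq_true, beq_iff_eq, Bool.or_true, Bool.or_false, Bool.true_or, Bool.false_or, Bool.false_eq_true, Bool.true_eq_false, eq_self_iff_true, and_true, true_and, and_false, false_and, reduceIte, String.reduceEq, Nat.zero_min, Nat.min_zero, Nat.min_self, lt_irrefl, hFl, hT0, hD0, hT1, hE1, hT2, hE2, hT3, hE3, hT4, hE4, hT5, hE5, hT6, hE6, hT7, hE7]; all_goals ((try split_ifs) <;> omega)
  rcases pvBoolTF ((["repair", "fix", "service", "maintenance"].any fun k => PySem.Str.isIn k tl)) with hT8 | hT8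
  · simp only [Bool.or_eq_true, beq_iff_eq, Bool.or_true, Bool.or_false, Bool.true_or, Bool.false_or, Bool.false_eq_true, Bool.true_eq_false, eq_self_iff_true, and_true, true_and, and_false, false_and, reduceIte, String.reduceEq, Nat.zero_min, Nat.min_zero, Nat.min_self, lt_irrefl, hFl, hT0, hD0, hT1, hE1, hT2, hE2, hT3, hE3, hT4, hE4, hT5, hE5, hT6, hE6, hT7, hE7, hT8]; all_goals ((try split_ifs) <;> omega)
  by_cases hE8 : cl = "maintenance"
  · simp only [Bool.or_eq_true, beq_iff_eq, Bool.or_true, Bool.or_false, Bool.true_or, Bool.false_or, Bool.false_eq_true, Bool.true_eq_false, eq_self_iff_true, and_true, true_and, and_false, false_and, reduceIte, String.reduceEq, Nat.zero_min, Nat.min_zero, Nat.min_self, lt_irrefl, hFl, hT0, hD0, hT1, hE1, hT2, hE2, hT3, hE3, hT4, hE4, hT5, hE5, hT6, hE6, hT7, hE7, hT8, hE8]; all_goals ((try split_ifs) <;> omega)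
  rcases pvBoolTF ((["bank", "payment", "tax", "budget"].any fun k => PySem.Str.isIn k tl)) with hT9 | hT9
  · simp only [Bool.or_eq_true, beq_iff_eq, Bool.or_true, Bool.or_false, Bool.true_or, Bool.false_or, Bool.false_eq_true, Bool.true_eq_false, eq_self_iff_true, and_true, true_and, and_false, false_and, reduceIte, String.reduceEq, Nat.zero_min, Nat.min_zero, Nat.min_self, lt_irrefl, hFl, hT0, hD0, hT1, hE1, hT2, hE2, hT3, hE3, hT4, hE4, hT5, hE5, hT6, hE6, hT7, hE7, hT8, hE8, hT9]; all_goals ((try split_ifs) <;> omega)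
  by_cases hE9 : cl = "finance"
  · simp only [Bool.or_eq_true, beq_iff_eq, Bool.or_true, Bool.or_false, Bool.true_or, Bool.false_or, Bool.false_eq_true, Bool.true_eq_false, eq_self_iff_true, and_true, true_and, and_false, false_and, reduceIte, String.reduceEq, Nat.zero_min, Nat.min_zero, Nat.min_self, lt_irrefl, hFl, hT0, hD0, hT1, hE1, hT2, hE2, hT3, hE3, hT4, hE4, hT5, hE5, hT6, hE6, hT7, hE7, hT8, hE8, hT9, hE9]; all_goals ((try split_ifs) <;> omega)
  simp only [Bool.or_eq_true, beq_iff_eq, Bool.or_true, Bool.or_false, Bool.true_or, Bool.false_or, Bool.false_eq_true, Bool.true_eq_false, eq_self_iff_true, and_true, true_and, and_false, false_and, reduceIte, String.reduceEq, Nat.zero_min, Nat.min_zero, Nat.min_self, lt_irrefl, hFl, hT0, hD0, hT1, hE1, hT2, hE2, hT3, hE3, hT4, hE4, hT5, hE5, hT6, hE6, hT7, hE7, hT8, hE8, hT9, hE9]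

-- B's best rank is A's first-match rank
lemma pvBest_eq (tl dl cl : String) : pvBestRank tl dl cl = pvARank tl dl cl := by
  unfold pvBestRank
  simp only [pvCritical]
  rw [pvFold_eq, pvCat_eq, pvKey]
  rfl

-- ===== VERDICT (by name: the statement is the Claim_ definition above) =====
theorem get_smart_reminder_py_spec : Claim_equal_get_smart_reminder_py := by
  intro title description category _
  unfold Spec_get_smart_reminder_py
  simp only [get_smart_reminder_py_alt]
  rw [pvBest_eq, ← pvA_rank]
  rfl
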